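-- pv_equiv track=rewrite | github.com/liskos/zadanie25osipov | variant_13/22.py | f
-- ===== SOURCE A (Python) =====
-- def f(x):
--     S = 0
--     while x > 0:
--         if x % 5 > 0:
--             S = S + (x % 5)
--         else:
--             S = S * (x % 5)
--         x = x // 5
--     return S
-- ===== SOURCE B (Python) =====
-- def f(x):
--     if x <= 0:
--         return 0
--     digits = []
--     while x > 0:
--         digits.append(x % 5)
--         x //= 5
--     rev = digits[::-1]
--     if 0 in rev:
--         j = rev.index(0)
--         k = len(digits) - 1 - j
--         return sum(digits[k + 1:])
--     return sum(digits)
-- ===== Notes on version B (the rewrite author's own statement) =====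
-- stated objective: alternative
-- what changed: B collects the base-5 digits into a list once, then replaces A's running multiply-by-zero reset with a split: find the most-significant zero digit and sum only the digits above it (or all digits if none is zero).
import Mathlib
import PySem

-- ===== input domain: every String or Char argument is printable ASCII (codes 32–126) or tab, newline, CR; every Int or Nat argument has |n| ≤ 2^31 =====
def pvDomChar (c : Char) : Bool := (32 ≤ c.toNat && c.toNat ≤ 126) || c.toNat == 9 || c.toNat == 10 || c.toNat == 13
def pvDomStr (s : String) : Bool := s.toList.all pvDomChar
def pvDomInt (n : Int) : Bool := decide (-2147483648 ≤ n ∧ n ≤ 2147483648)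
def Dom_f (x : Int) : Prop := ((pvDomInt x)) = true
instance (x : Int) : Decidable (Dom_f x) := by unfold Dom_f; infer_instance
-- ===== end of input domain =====

-- B sums the base-5 digits above the most-significant zero digit (collected once into a list)
-- instead of A's running multiply-by-zero reset loop; objective: alternative decomposition, same cost.

-- ===== PORT A =====
-- while x > 0: S updated, x = x // 5   (literal loop, state (x, S))
def fLoopA (x S : Int) : Int :=
  if h : x > 0 then
    if PySem.Int.mod x 5 > 0 then
      fLoopA (PySem.Int.floordiv x 5) (S + PySem.Int.mod x 5)
    else
      fLoopA (PySem.Int.floordiv x 5) (S * PySem.Int.mod x 5)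
  else S
termination_by x.toNat
decreasing_by
  all_goals
    have h5 : PySem.Int.floordiv x 5 = x / 5 := PySem.Int.floordiv_eq_ediv_of_pos (by omega)
    omega

def f (x : Int) : Int := fLoopA x 0

-- ===== PORT B =====
-- digits.append(x % 5); x //= 5   (same loop shape, collecting the digit list LSB first)
def digitsOf (x : Int) : List Int :=
  if h : x > 0 then PySem.Int.mod x 5 :: digitsOf (PySem.Int.floordiv x 5)
  else []
termination_by x.toNat
decreasing_by
  have h5 : PySem.Int.floordiv x 5 = x / 5 := PySem.Int.floordiv_eq_ediv_of_pos (by omega)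
  omega

def f_alt (x : Int) : Int :=
  if x ≤ 0 then 0
  else
    let D := digitsOf x
    let rev := D.reverse
    if 0 ∈ rev then
      -- j = rev.index(0): index? is some here since 0 ∈ rev, so getD 0 is exact
      let j : Int := ((PySem.List.index? rev 0).getD 0 : Nat)
      let k : Int := (D.length : Int) - 1 - j
      (PySem.List.slice D (some (k + 1)) none).sum   -- sum(digits[k+1:])
    else D.sum

-- ===== PRECONDITION & SPEC =====
def Spec_f (x : Int) (out : Int) : Prop := out = f_alt x
instance (x : Int) (out : Int) : Decidable (Spec_f x out) := by unfold Spec_f; infer_instance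

-- ===== CLAIM (what is proved, stated in full; the proofs are below) =====
def Claim_equal_f : Prop := ∀ (x : Int), Dom_f x → Spec_f x (f x)

-- ===== LEMMAS AND PROOFS =====

-- list-level image of A's loop
def procD : List Int → Int → Int
  | [], S => S
  | d :: t, S => procD t (if d > 0 then S + d else S * d)

-- sum of the digits above the most-significant zero (used only when 0 ∈ list)
def saz : List Int → Int
  | [] => 0
  | _ :: t => if 0 ∈ t then saz t else t.sum

theorem digitsOf_nonneg (x : Int) : ∀ d ∈ digitsOf x, 0 ≤ d := by
  rw [digitsOf]
  split
  · rename_i h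
    intro d hd
    rcases List.mem_cons.mp hd with h1 | h1
    · subst h1; exact PySem.Int.mod_nonneg _ (by omega)
    · exact digitsOf_nonneg _ d h1
  · intro d hd; simp at hd
termination_by x.toNat
decreasing_by
  have h5 : PySem.Int.floordiv x 5 = x / 5 := PySem.Int.floordiv_eq_ediv_of_pos (by omega)
  omega

theorem fLoopA_eq_procD (x S : Int) : fLoopA x S = procD (digitsOf x) S := by
  rw [fLoopA, digitsOf]
  split
  · rename_i h
    split
    · rename_i hm
      have := fLoopA_eq_procD (PySem.Int.floordiv x 5) (S + PySem.Int.mod x 5)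
      simp only [procD, if_pos hm]
      exact this
    · rename_i hm
      have := fLoopA_eq_procD (PySem.Int.floordiv x 5) (S * PySem.Int.mod x 5)
      simp only [procD, if_neg hm]
      exact this
  · rfl
termination_by x.toNat
decreasing_by
  all_goals
    have h5 : PySem.Int.floordiv x 5 = x / 5 := PySem.Int.floordiv_eq_ediv_of_pos (by omega)
    omega

theorem procD_char (ds : List Int) (S : Int) (hnn : ∀ d ∈ ds, 0 ≤ d) :
    procD ds S = if 0 ∈ ds then saz ds else S + ds.sum := by
  induction ds generalizing S with
  | nil => simp [procD]
  | cons d t ih =>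
    have hd : 0 ≤ d := hnn d (List.mem_cons_self ..)
    have ht : ∀ e ∈ t, 0 ≤ e := fun e he => hnn e (List.mem_cons_of_mem _ he)
    by_cases h0t : 0 ∈ t
    · simp [procD, ih _ ht, h0t, saz]
    · by_cases hd0 : d = 0
      · subst hd0
        simp [procD, ih _ ht, h0t, saz]
      · have hdpos : d > 0 := by omega
        simp [procD, hdpos, ih _ ht, h0t, saz, List.mem_cons]
        rw [if_neg (show ¬ ((0:Int) = d) by omega)]
        ring

theorem drop_sum_of_index_rev (D : List Int) (j : Nat)
    (hj : PySem.List.index? D.reverse 0 = some j) :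
    j < D.length ∧ (D.drop (D.length - j)).sum = saz D := by
  induction D with
  | nil => simp [PySem.List.index?_eq_idxOf?] at hj
  | cons d t ih =>
    by_cases h0t : 0 ∈ t
    · have h0r : (0:Int) ∈ t.reverse := by simpa using h0t
      rw [List.reverse_cons, PySem.List.index?_append_of_mem _ h0r] at hj
      obtain ⟨hjlt, hsum⟩ := ih hj
      constructor
      · simp; omega
      · have : (d :: t).length - j = (t.length - j) + 1 := by simp; omega
        rw [this, List.drop_succ_cons, hsum]
        simp [saz, h0t]
    · have h0r : (0:Int) ∉ t.reverse := by simpa using h0t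
      have hd0 : d = 0 := by
        rcases PySem.List.getElem_of_index?_eq_some hj with ⟨hk, hv, _⟩
        by_contra hne
        have : (0:Int) ∈ (d :: t).reverse := hv ▸ List.getElem_mem hk
        simp [List.mem_reverse, List.mem_cons] at this
        tauto
      subst hd0
      rw [List.reverse_cons, PySem.List.index?_append_singleton_self (h := h0r)] at hj
      simp at hj
      subst hj
      refine ⟨by simp, ?_⟩
      simp [saz, h0t]

theorem f_alt_char (x : Int) :
    f_alt x = if 0 ∈ digitsOf x then saz (digitsOf x) else (digitsOf x).sum := by
  by_cases hx : x ≤ 0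
  · have hD : digitsOf x = [] := by rw [digitsOf]; simp; omega
    simp [f_alt, hx, hD]
  · rw [f_alt]
    simp only [hx, if_false]
    by_cases h0 : (0:Int) ∈ (digitsOf x).reverse
    · have h0D : (0:Int) ∈ digitsOf x := List.mem_reverse.mp h0
      simp only [h0, if_true, h0D]
      obtain ⟨j, hj⟩ := Option.isSome_iff_exists.mp
        ((PySem.List.index?_isSome_iff _ _).mpr h0)
      obtain ⟨hjlt, hsum⟩ := drop_sum_of_index_rev (digitsOf x) j hj
      rw [hj]
      simp only [Option.getD_some]
      have hk : ((digitsOf x).length : Int) - 1 - (j : Nat) + 1 = ((digitsOf x).length - j : Nat) := by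
        omega
      rw [hk, PySem.List.slice_from _ (Int.natCast_nonneg _)]
      simpa using hsum
    · have h0D : (0:Int) ∉ digitsOf x := fun h => h0 (List.mem_reverse.mpr h)
      simp [h0, h0D]

-- ===== VERDICT (by name: the statement is the Claim_ definition above) =====
theorem f_spec : Claim_equal_f := by
  intro x _
  show f x = f_alt x
  rw [f, fLoopA_eq_procD, procD_char _ _ (digitsOf_nonneg x), f_alt_char]
  split <;> simp
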